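-- pv_equiv track=rewrite | github.com/romannoff/JupyterLMS | lms/course/src/jupyter_parser.py | get_no_hidden_text
-- ===== SOURCE A (Python) =====
-- def get_no_hidden_text(cell):
--     text = []
--     lines = cell.split('\n')
--
--     is_hidden = False
--
--     for line in lines:
--         if line.strip() == '#HIDDEN':
--             is_hidden = bool((is_hidden + 1) % 2)
--         elif not is_hidden:
--             text.append(line)
--     return '\n'.join(text)
-- ===== SOURCE B (Python) =====
-- def get_no_hidden_text(cell):
--     groups = [[]]
--     for line in cell.split('\n'):
--         if line.strip() == '#HIDDEN':
--             groups.append([])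
--         else:
--             groups[-1].append(line)
--     return '\n'.join(line for g in groups[::2] for line in g)
-- ===== Notes on version B (the rewrite author's own statement) =====
-- stated objective: alternative
-- what changed: Replaces the toggled is_hidden boolean with a two-pass decomposition: one pass splits the lines into #HIDDEN-delimited groups, a second pass keeps the even-indexed groups and joins their lines.
import Mathlib
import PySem

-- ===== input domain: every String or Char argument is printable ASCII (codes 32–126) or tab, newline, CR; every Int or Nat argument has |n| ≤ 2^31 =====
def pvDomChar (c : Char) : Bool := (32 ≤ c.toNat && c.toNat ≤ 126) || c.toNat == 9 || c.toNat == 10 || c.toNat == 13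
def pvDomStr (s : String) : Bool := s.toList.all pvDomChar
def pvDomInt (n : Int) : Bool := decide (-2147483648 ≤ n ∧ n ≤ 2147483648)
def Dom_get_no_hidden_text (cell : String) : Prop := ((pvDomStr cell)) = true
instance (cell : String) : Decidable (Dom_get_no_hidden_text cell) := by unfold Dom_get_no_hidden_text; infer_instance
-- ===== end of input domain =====

-- B re-implements the #HIDDEN filter by splitting the lines into marker-delimited groups and
-- keeping the even-indexed groups (objective: alternative decomposition, same cost).

-- ===== PORT A =====
-- literal port of A: one fold over the lines with state (text, is_hidden);
-- Python's `bool((is_hidden + 1) % 2)` is exactly boolean negation, ported as `!`.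
def get_no_hidden_text (cell : String) : String :=
  let lines := (PySem.Str.split? cell "\n").getD []   -- sep "\n" ≠ "": getD default never used
  let st := lines.foldl (fun (st : List String × Bool) line =>
      if PySem.Str.strip line = "#HIDDEN" then (st.1, !st.2)
      else if !st.2 then (st.1 ++ [line], st.2)
      else st) ([], false)
  PySem.Str.join "\n" st.1

-- ===== PORT B =====
-- port of Source B's `groups[::2]` (every second group, starting at index 0)
def pvEvens {α : Type} : List α → List α
  | [] => []
  | [x] => [x]
  | x :: _ :: rest => x :: pvEvens rest

def get_no_hidden_text_alt (cell : String) : String :=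
  let lines := (PySem.Str.split? cell "\n").getD []   -- sep "\n" ≠ "": getD default never used
  let groups := lines.foldl (fun (gs : List (List String)) line =>
      if PySem.Str.strip line = "#HIDDEN" then gs ++ [[]]
      else gs.dropLast ++ [((gs.getLast?).getD []) ++ [line]]) [[]]  -- groups[-1].append(line); gs never empty
  PySem.Str.join "\n" (pvEvens groups).flatten

-- ===== PRECONDITION & SPEC =====
def Spec_get_no_hidden_text (cell : String) (out : String) : Prop := out = get_no_hidden_text_alt cell
instance (cell : String) (out : String) : Decidable (Spec_get_no_hidden_text cell out) := by unfold Spec_get_no_hidden_text; infer_instance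

-- ===== CLAIM (what is proved, stated in full; the proofs are below) =====
def Claim_equal_get_no_hidden_text : Prop := ∀ (cell : String), Dom_get_no_hidden_text cell → Spec_get_no_hidden_text cell (get_no_hidden_text cell)

-- ===== LEMMAS AND PROOFS =====

theorem pvEvens_concat {α : Type} (done : List α) (cur : α) :
    pvEvens (done ++ [cur]) =
      if done.length % 2 = 0 then pvEvens done ++ [cur] else pvEvens done := by
  induction done using pvEvens.induct with
  | case1 => simp [pvEvens]
  | case2 x => simp [pvEvens]
  | case3 x y rest ih =>
      simp only [List.cons_append, pvEvens, List.length_cons, ih]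
      rcases Nat.even_or_odd rest.length with h | h
      · have h0 : rest.length % 2 = 0 := Nat.even_iff.mp h
        simp [h0, Nat.add_mod]
      · have h1 : rest.length % 2 = 1 := Nat.odd_iff.mp h
        simp [h1, Nat.add_mod]

-- the loop invariant: A's accumulated text is always the flatten of the even groups of B's state
theorem pv_loop_eq (lines : List String) :
    ∀ (done : List (List String)) (cur : List String),
    (lines.foldl (fun (st : List String × Bool) line =>
        if PySem.Str.strip line = "#HIDDEN" then (st.1, !st.2)
        else if !st.2 then (st.1 ++ [line], st.2)
        else st) ((pvEvens (done ++ [cur])).flatten, decide (done.length % 2 = 1))).1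
    = (pvEvens (lines.foldl (fun (gs : List (List String)) line =>
        if PySem.Str.strip line = "#HIDDEN" then gs ++ [[]]
        else gs.dropLast ++ [((gs.getLast?).getD []) ++ [line]]) (done ++ [cur]))).flatten := by
  induction lines with
  | nil => intro done cur; simp
  | cons line rest ih =>
      intro done cur
      by_cases hm : PySem.Str.strip line = "#HIDDEN"
      · -- marker line: B starts a new empty group, A toggles the flag
        simp only [List.foldl_cons, hm, if_true]
        have hacc : (pvEvens (done ++ [cur])).flatten
            = (pvEvens ((done ++ [cur]) ++ [([] : List String)])).flatten := by
          rw [pvEvens_concat (done ++ [cur])]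
          split_ifs <;> simp
        have hb : (!decide (done.length % 2 = 1))
            = decide ((done ++ [cur]).length % 2 = 1) := by
          simp only [List.length_append, List.length_cons, List.length_nil]
          rcases Nat.even_or_odd done.length with h | h
          · have h0 : done.length % 2 = 0 := Nat.even_iff.mp h
            simp [h0, Nat.add_mod]
          · have h1 : done.length % 2 = 1 := Nat.odd_iff.mp h
            simp [h1, Nat.add_mod]
        rw [hacc, hb]
        exact ih (done ++ [cur]) []
      · -- ordinary line: B appends it to the current (= last) group
        simp only [List.foldl_cons, hm, if_false,
          List.dropLast_concat, List.getLast?_concat, Option.getD_some]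
        by_cases hp : done.length % 2 = 1
        · -- hidden: A drops the line; the current group has odd index, so it is not an even group
          have hb : decide (done.length % 2 = 1) = true := by simp [hp]
          have h0 : ¬ done.length % 2 = 0 := by omega
          simp only [hb, Bool.not_true, if_neg (by simp : ¬ (false = true))]
          have hacc : (pvEvens (done ++ [cur])).flatten
              = (pvEvens (done ++ [cur ++ [line]])).flatten := by
            rw [pvEvens_concat, pvEvens_concat]; simp [h0]
          rw [hacc]
          have := ih done (cur ++ [line])
          simpa [hb] using this
        · -- visible: A appends the line; the current group has even index
          have hb : decide (done.length % 2 = 1) = false := by simp [hp]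
          have h0 : done.length % 2 = 0 := by omega
          simp only [hb, Bool.not_false]
          have hacc : (pvEvens (done ++ [cur])).flatten ++ [line]
              = (pvEvens (done ++ [cur ++ [line]])).flatten := by
            rw [pvEvens_concat, pvEvens_concat]; simp [h0]
          rw [hacc]
          have := ih done (cur ++ [line])
          simpa [hb] using this

-- ===== VERDICT (by name: the statement is the Claim_ definition above) =====
theorem get_no_hidden_text_spec : Claim_equal_get_no_hidden_text := by
  intro cell _
  unfold Spec_get_no_hidden_text get_no_hidden_text get_no_hidden_text_alt
  have h := pv_loop_eq ((PySem.Str.split? cell "\n").getD []) [] []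
  simp only [List.nil_append] at h
  simp only []
  rw [show (pvEvens ([([] : List String)])).flatten = ([] : List String) by rfl] at h
  rw [show (decide (([] : List (List String)).length % 2 = 1)) = false by rfl] at h
  rw [h]
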